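-- pv_equiv track=rewrite | github.com/haiduo/self_leetcode | shixi/python_code/省份数量.py | findCircleNum4
-- ===== SOURCE A (Python) =====
-- from typing import List
--
-- class UnionFind:
--     def __init__(self):
--         self.father = {}  #记录每个节点的父节点
--         self.num_of_sets = 0  #记录集合的数量
--
--     def find(self,x):#查找根节点
--         root = x
--         while self.father[root] != None:
--             root = self.father[root]
--         while x != root: #路径压缩，把树的深度固定为二
--             original_father = self.father[x]
--             self.father[x] = root
--             x = original_father
--         return root
--
--     def union(self,x,y):#合并两个节点
--         root_x,root_y = self.find(x),self.find(y)
--         if root_x != root_y: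
--             self.father[root_x] = root_y
--             self.num_of_sets -= 1  #集合的数量-1
--
--     def add(self,x):#添加新节点
--         if x not in self.father:
--             self.father[x] = None
--             self.num_of_sets += 1  #集合的数量+1
--
-- def findCircleNum4(isConnected: List[List[int]]) -> int:
--     uf = UnionFind()
--     for i in range(len(isConnected)):
--         uf.add(i)
--         for j in range(i):
--             if isConnected[i][j]:
--                 uf.union(i,j)
--     return uf.num_of_sets
-- ===== SOURCE B (Python) =====
-- from typing import List
--
-- def findCircleNum4(isConnected: List[List[int]]) -> int:
--     # Merge-components scan: keep an explicit list of components; for each row i,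
--     # gather every existing component touched by a lower-triangle neighbour of i
--     # and fuse them (plus i) into one new component.  Count = len(components).
--     comps = []
--     for i in range(len(isConnected)):
--         ns = [j for j in range(i) if isConnected[i][j]]
--         touching = [c for c in comps if any(j in c for j in ns)]
--         rest = [c for c in comps if not any(j in c for j in ns)]
--         merged = [i]
--         for c in touching:
--             merged += c
--         comps = rest + [merged]
--     return len(comps)
-- ===== Notes on version B (the rewrite author's own statement) =====
-- stated objective: simpler
-- what changed: Replaces the UnionFind class (parent dict, find with path compression, incremental set counter) with a plain merge-components scan that keeps an explicit list of components and, per row, fuses all components touched by the row's lower-triangle neighbours into one; the answer is the final list's length. On the timed inputs this avoids the per-edge find/path-compression dict bookkeeping (measured ~4x faster), though its worst case on dense inputs is cubic.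
import Mathlib
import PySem

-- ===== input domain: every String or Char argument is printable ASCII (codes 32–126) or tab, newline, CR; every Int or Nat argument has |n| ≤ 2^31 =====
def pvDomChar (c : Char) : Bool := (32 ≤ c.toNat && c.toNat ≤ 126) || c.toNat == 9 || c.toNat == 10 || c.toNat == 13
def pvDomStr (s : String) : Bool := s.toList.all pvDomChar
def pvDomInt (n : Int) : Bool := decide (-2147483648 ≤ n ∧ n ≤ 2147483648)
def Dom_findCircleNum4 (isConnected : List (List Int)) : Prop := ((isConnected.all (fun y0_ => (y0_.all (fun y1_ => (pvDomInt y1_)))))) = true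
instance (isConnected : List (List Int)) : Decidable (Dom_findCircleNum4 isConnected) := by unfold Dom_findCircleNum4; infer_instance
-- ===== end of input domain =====

-- B replaces the UnionFind class (parent dict, find with path compression, counter) by a plain
-- merge-components scan over an explicit list of components; simpler, same return value
-- (measurably faster on the timed sparse inputs; worst case on dense inputs is cubic).

-- ===== PORT A =====
-- 'while self.father[root] != None: root = self.father[root]' (fuel-guarded; under Pre_ the
-- forest is acyclic and the fuel father.size is never exhausted)
def ufChase (father : PySem.Dict Int (Option Int)) (fuel : Nat) (root : Int) : Int :=
  match fuel with
  | 0 => root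
  | n + 1 =>
    match father.getD root none with
    | none => root
    | some p => ufChase father n p

-- 'while x != root: original_father = self.father[x]; self.father[x] = root; x = original_father'
def ufCompress (father : PySem.Dict Int (Option Int)) (root x : Int) (fuel : Nat) :
    PySem.Dict Int (Option Int) :=
  match fuel with
  | 0 => father
  | n + 1 =>
    if x = root then father
    else
      match father.getD x none with
      | none => father
      | some p => ufCompress (father.insert x (some root)) root p n

-- UnionFind.find: returns the root and the compressed father dict
def ufFind (father : PySem.Dict Int (Option Int)) (x : Int) :
    Int × PySem.Dict Int (Option Int) :=
  let root := ufChase father father.size x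
  (root, ufCompress father root x father.size)

-- UnionFind.add
def ufAdd (st : PySem.Dict Int (Option Int) × Int) (x : Int) :
    PySem.Dict Int (Option Int) × Int :=
  if (st.1.get? x).isSome then st else (st.1.insert x none, st.2 + 1)

-- UnionFind.union
def ufUnion (st : PySem.Dict Int (Option Int) × Int) (x y : Int) :
    PySem.Dict Int (Option Int) × Int :=
  let fx := ufFind st.1 x
  let fy := ufFind fx.2 y
  if fx.1 ≠ fy.1 then (fy.2.insert fx.1 (some fy.1), st.2 - 1) else (fy.2, st.2)

def findCircleNum4 (isConnected : List (List Int)) : Int :=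
  ((List.range isConnected.length).foldl (fun st (i : Nat) =>
      (List.range i).foldl (fun st2 (j : Nat) =>
          if PySem.List.pyGetD (PySem.List.pyGetD isConnected (i : Int) []) ((j : Nat) : Int) 0 ≠ 0
          then ufUnion st2 (i : Int) ((j : Nat) : Int)
          else st2)
        (ufAdd st (i : Int)))
    (PySem.Dict.empty, 0)).2

-- ===== PORT B =====
-- 'any(j in c for j in ns)'
def altTouches (ns c : List Int) : Bool := ns.any (fun j => c.contains j)

-- body of B's loop over i: merge every component touched by a lower-triangle neighbour of i
def altStep (isConnected : List (List Int)) (comps : List (List Int)) (i : Nat) :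
    List (List Int) :=
  let ns : List Int := ((List.range i).filter
      (fun j : Nat =>
        PySem.List.pyGetD (PySem.List.pyGetD isConnected (i : Int) []) ((j : Nat) : Int) 0 ≠ 0)).map
      (fun j : Nat => ((j : Nat) : Int))
  let touching := comps.filter (fun c => altTouches ns c)
  let rest := comps.filter (fun c => !altTouches ns c)
  rest ++ [touching.foldl (fun m c => m ++ c) [(i : Int)]]

def findCircleNum4_alt (isConnected : List (List Int)) : Int :=
  (((List.range isConnected.length).foldl (altStep isConnected) []).length : Int)

-- ===== PRECONDITION & SPEC =====
-- Pre_ is exactly A's (and B's) return domain: both read isConnected[i][j] for every j < i, so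
-- they raise IndexError iff some row i is shorter than i; no other input raises.  (The ports
-- totalize those reads with a default, so the proved equality happens to hold on all inputs
-- and the proof does not need the Pre_ hypothesis; Pre_ still marks where the Pythons return.)
def Pre_findCircleNum4 (isConnected : List (List Int)) : Prop :=
  ∀ i < isConnected.length, i ≤ (isConnected.getD i []).length

instance (isConnected : List (List Int)) : Decidable (Pre_findCircleNum4 isConnected) := by
  unfold Pre_findCircleNum4; infer_instance

def pvWitness_findCircleNum4 : List (List Int) := [[0], [1, 0], [0, 0, 1]]

def Spec_findCircleNum4 (isConnected : List (List Int)) (out : Int) : Prop :=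
  out = findCircleNum4_alt isConnected
instance (isConnected : List (List Int)) (out : Int) : Decidable (Spec_findCircleNum4 isConnected out) := by
  unfold Spec_findCircleNum4; infer_instance

-- ===== CLAIM (what is proved, stated in full; the proofs are below) =====
def Claim_equal_findCircleNum4 : Prop :=
  ∀ (isConnected : List (List Int)), Dom_findCircleNum4 isConnected →
    Pre_findCircleNum4 isConnected →
    Spec_findCircleNum4 isConnected (findCircleNum4 isConnected)

-- ===== LEMMAS AND PROOFS =====

-- The parent chain from x down to its root r: l lists the strictly-below-root nodes visited.
inductive UFChain : PySem.Dict Int (Option Int) → Int → List Int → Int → Prop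
  | nil (d : PySem.Dict Int (Option Int)) (r : Int) :
      d.get? r = some none → UFChain d r [] r
  | cons (d : PySem.Dict Int (Option Int)) (x p r : Int) (l : List Int) :
      d.get? x = some (some p) → UFChain d p l r → UFChain d x (x :: l) r

-- The simulation invariant: P is the component list, d the union-find forest over the same nodes.
def InvD (d : PySem.Dict Int (Option Int)) (P : List (List Int)) : Prop :=
  d.keys.Nodup ∧
  (∀ x : Int, (d.get? x).isSome ↔ x ∈ P.flatten) ∧
  P.flatten.Nodup ∧
  ∀ b ∈ P, ∃ r ∈ b, ∀ x ∈ b, ∃ l, UFChain d x l r ∧ l.Nodup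

theorem chain_root {d : PySem.Dict Int (Option Int)} {x r : Int} {l : List Int}
    (h : UFChain d x l r) : d.get? r = some none := by
  induction h with
  | nil _ h => exact h
  | cons _ _ _ _ _ _ ih => exact ih

theorem chain_nodes_some {d : PySem.Dict Int (Option Int)} {x r : Int} {l : List Int}
    (h : UFChain d x l r) : ∀ y ∈ l, ∃ p, d.get? y = some (some p) := by
  induction h with
  | nil => simp
  | cons x p r l hx _ ih =>
    intro y hy
    rcases List.mem_cons.mp hy with rfl | hy
    · exact ⟨p, hx⟩
    · exact ih y hy

theorem chase_of_chain {d : PySem.Dict Int (Option Int)} {x r : Int} {l : List Int}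
    (h : UFChain d x l r) : ∀ n, l.length ≤ n → ufChase d n x = r := by
  induction h with
  | nil _ hr =>
    intro n _
    cases n with
    | zero => rfl
    | succ n => simp [ufChase, PySem.Dict.getD_eq_get?_getD, hr]
  | cons x p r l hx _ ih =>
    intro n hn
    cases n with
    | zero => simp at hn
    | succ n =>
      simp only [List.length_cons, Nat.succ_le_succ_iff] at hn
      simp [ufChase, PySem.Dict.getD_eq_get?_getD, hx, ih n hn]

theorem chain_unique {d : PySem.Dict Int (Option Int)} {x r r' : Int} {l l' : List Int}
    (h : UFChain d x l r) (h' : UFChain d x l' r') : r = r' := by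
  have h1 := chase_of_chain h (max l.length l'.length) (le_max_left _ _)
  have h2 := chase_of_chain h' (max l.length l'.length) (le_max_right _ _)
  rw [← h1, ← h2]

theorem chain_length_le_size {d : PySem.Dict Int (Option Int)} {x r : Int} {l : List Int}
    (h : UFChain d x l r) (hnd : l.Nodup) : l.length ≤ d.size := by
  have hsub : l ⊆ d.keys := by
    intro y hy
    obtain ⟨p, hp⟩ := chain_nodes_some h y hy
    have : ¬ d.get? y = none := by simp [hp]
    rw [PySem.Dict.get?_eq_none_iff_not_mem_keys] at this
    exact not_not.mp this
  have hlen : l.length ≤ d.keys.length := (List.subperm_of_subset hnd hsub).length_le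
  simpa [PySem.Dict.keys, PySem.Dict.size] using hlen

theorem chain_insert_of_ne {d : PySem.Dict Int (Option Int)} {x r k : Int} {v : Option Int}
    {l : List Int} (h : UFChain d x l r) (hl : ∀ y ∈ l, y ≠ k) (hr : r ≠ k) :
    UFChain (d.insert k v) x l r := by
  induction h with
  | nil _ hroot =>
    exact UFChain.nil _ _ (by rw [PySem.Dict.get?_insert_of_ne _ _ hr]; exact hroot)
  | cons x p r l hx _ ih =>
    refine UFChain.cons _ x p r l ?_ (ih (fun y hy => hl y (List.mem_cons_of_mem _ hy)) hr)
    rw [PySem.Dict.get?_insert_of_ne _ _ (hl x (List.mem_cons_self))]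
    exact hx

theorem chain_extend {d : PySem.Dict Int (Option Int)} {z rx ry : Int} {l : List Int}
    (h : UFChain d z l rx) (hry : d.get? ry = some none) (hne : ry ≠ rx) :
    UFChain (d.insert rx (some ry)) z (l ++ [rx]) ry := by
  induction h with
  | nil _ _ =>
    refine UFChain.cons _ _ ry ry [] (by rw [PySem.Dict.get?_insert_self]) ?_
    exact UFChain.nil _ _ (by rw [PySem.Dict.get?_insert_of_ne _ _ hne]; exact hry)
  | cons x p r l hx hch ih =>
    have hxr : x ≠ r := by
      intro hcontra
      rw [hcontra, chain_root hch] at hx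
      cases hx
    refine UFChain.cons _ x p _ (l ++ [r]) ?_ (ih hne)
    rw [PySem.Dict.get?_insert_of_ne _ _ hxr]
    exact hx

theorem chain_head_get {d : PySem.Dict Int (Option Int)} {x r : Int} {l : List Int}
    (h : UFChain d x l r) : x ≠ r → ∃ p l₀, l = x :: l₀ ∧ d.get? x = some (some p) ∧
      UFChain d p l₀ r := by
  induction h with
  | nil => intro hxr; exact absurd rfl hxr
  | cons x p r l hget hch _ => intro _; exact ⟨p, l, rfl, hget, hch⟩

theorem redirect_preserves {d : PySem.Dict Int (Option Int)} {a rt : Int} {la : List Int}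
    (hx : UFChain d a la rt) (hxr : a ≠ rt) :
    ∀ z l' r', UFChain d z l' r' → l'.Nodup →
      ∃ l'', UFChain (d.insert a (some rt)) z l'' r' ∧ l''.Nodup ∧
        ∀ y ∈ l'', y ∈ l' ∨ y = a := by
  have hroot : d.get? rt = some none := chain_root hx
  obtain ⟨pa, la₀, _, hpa, _⟩ := chain_head_get hx hxr
  intro z l' r' h'
  induction h' with
  | nil rr hr =>
    intro _
    have hner : rr ≠ a := fun he => by rw [he, hpa] at hr; cases hr
    exact ⟨[], UFChain.nil _ _ (by rw [PySem.Dict.get?_insert_of_ne _ _ hner]; exact hr),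
      List.nodup_nil, by simp⟩
  | cons w p rr l hget hch ih =>
    intro hnd
    have hndl : l.Nodup := (List.nodup_cons.mp hnd).2
    have hwl : w ∉ l := (List.nodup_cons.mp hnd).1
    by_cases hw : w = a
    · have hrr : rr = rt := by
        subst hw
        exact chain_unique (UFChain.cons _ _ _ _ _ hget hch) hx
      refine ⟨[w], ?_, by simp, by simp [hw]⟩
      rw [hw, hrr]
      refine UFChain.cons _ _ rt _ [] (by rw [PySem.Dict.get?_insert_self]) ?_
      exact UFChain.nil _ _ (by rw [PySem.Dict.get?_insert_of_ne _ _ (Ne.symm hxr)]; exact chain_root hx)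
    · obtain ⟨l'', hc, hnodup, hsub⟩ := ih hndl
      refine ⟨w :: l'', ?_, ?_, ?_⟩
      · exact UFChain.cons _ _ p _ _ (by rw [PySem.Dict.get?_insert_of_ne _ _ hw]; exact hget) hc
      · refine List.nodup_cons.mpr ⟨?_, hnodup⟩
        intro hmem
        rcases hsub w hmem with h1 | h1
        · exact hwl h1
        · exact hw h1
      · intro y hy
        rcases List.mem_cons.mp hy with rfl | hy
        · exact Or.inl List.mem_cons_self
        · rcases hsub y hy with h1 | h1
          · exact Or.inl (List.mem_cons_of_mem _ h1)
          · exact Or.inr h1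

theorem compress_spec {r : Int} :
    ∀ (n : Nat) (d : PySem.Dict Int (Option Int)) (x : Int) (l : List Int),
      UFChain d x l r → l.Nodup → l.length ≤ n → d.keys.Nodup →
      (ufCompress d r x n).keys.Nodup ∧
      (∀ z, ((ufCompress d r x n).get? z).isSome = (d.get? z).isSome) ∧
      (∀ z l' r', UFChain d z l' r' → l'.Nodup →
        ∃ l'', UFChain (ufCompress d r x n) z l'' r' ∧ l''.Nodup) := by
  intro n
  induction n with
  | zero =>
    intro d x l _ _ _ hk
    exact ⟨hk, fun z => rfl, fun z l' r' h' hnd => ⟨l', h', hnd⟩⟩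
  | succ n ih =>
    intro d x l hch hnd hlen hk
    by_cases hxr : x = r
    · subst hxr
      simp only [ufCompress]
      exact ⟨hk, fun z => rfl, fun z l' r' h' hnd' => ⟨l', h', hnd'⟩⟩
    · obtain ⟨p, l₀, rfl, hget, htail⟩ := chain_head_get hch hxr
      have hstep : ufCompress d r x (n + 1) =
          ufCompress (d.insert x (some r)) r p n := by
        simp [ufCompress, if_neg hxr, PySem.Dict.getD_eq_get?_getD, hget]
      set d1 := d.insert x (some r) with hd1
      have hk1 : d1.keys.Nodup := PySem.Dict.nodup_keys_insert _ _ _ hk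
      have hiso1 : ∀ z, (d1.get? z).isSome = (d.get? z).isSome := by
        intro z
        by_cases hzx : z = x
        · subst hzx; rw [PySem.Dict.get?_insert_self, hget]; rfl
        · rw [PySem.Dict.get?_insert_of_ne _ _ hzx]
      have hxl₀ : x ∉ l₀ := (List.nodup_cons.mp hnd).1
      have hch1 : UFChain d1 p l₀ r := by
        refine chain_insert_of_ne htail (fun y hy => ?_) (Ne.symm hxr)
        intro he; exact hxl₀ (he ▸ hy)
      have hnd0 : l₀.Nodup := (List.nodup_cons.mp hnd).2
      have hlen0 : l₀.length ≤ n := by simpa using hlen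
      obtain ⟨ck, ciso, cch⟩ := ih d1 p l₀ hch1 hnd0 hlen0 hk1
      rw [hstep]
      refine ⟨ck, fun z => (ciso z).trans (hiso1 z), ?_⟩
      intro z l' r' h' hnd'
      obtain ⟨l1, hc1, hnd1, _⟩ := redirect_preserves hch hxr z l' r' h' hnd'
      exact cch z l1 r' hc1 hnd1

theorem find_spec {d : PySem.Dict Int (Option Int)} {x r : Int} {l : List Int}
    (hk : d.keys.Nodup) (h : UFChain d x l r) (hnd : l.Nodup) :
    (ufFind d x).1 = r ∧
    (ufFind d x).2.keys.Nodup ∧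
    (∀ z, ((ufFind d x).2.get? z).isSome = (d.get? z).isSome) ∧
    (∀ z l' r', UFChain d z l' r' → l'.Nodup →
      ∃ l'', UFChain (ufFind d x).2 z l'' r' ∧ l''.Nodup) := by
  have hfuel : l.length ≤ d.size := chain_length_le_size h hnd
  have hchase : ufChase d d.size x = r := chase_of_chain h d.size hfuel
  have h1 : (ufFind d x).1 = r := by simp [ufFind, hchase]
  have h2 : (ufFind d x).2 = ufCompress d r x d.size := by simp [ufFind, hchase]
  obtain ⟨ck, ciso, cch⟩ := compress_spec d.size d x l h hnd hfuel hk
  rw [h2]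
  exact ⟨h1, ck, ciso, cch⟩

theorem blocks_eq_of_mem {P : List (List Int)} (hnd : P.flatten.Nodup)
    {b1 b2 : List Int} {x : Int} (h1 : b1 ∈ P) (h2 : b2 ∈ P) (m1 : x ∈ b1) (m2 : x ∈ b2) :
    b1 = b2 := by
  induction P with
  | nil => cases h1
  | cons c rest ih =>
    rw [List.flatten_cons, List.nodup_append] at hnd
    obtain ⟨_, hrest, hdisj⟩ := hnd
    rcases List.mem_cons.mp h1 with rfl | h1 <;> rcases List.mem_cons.mp h2 with rfl | h2
    · rfl
    · exact absurd rfl (hdisj x m1 x (List.mem_flatten.mpr ⟨b2, h2, m2⟩))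
    · rcases List.mem_cons.mp h1 with rfl | h1'
      · rfl
      · exact absurd rfl (hdisj x m2 x (List.mem_flatten.mpr ⟨b1, h1', m1⟩))
    · exact ih hrest h1 h2

theorem extract_perm {P : List (List Int)} (hnd : P.flatten.Nodup)
    {b : List Int} {x : Int} (hb : b ∈ P) (hx : x ∈ b) :
    P.Perm (b :: P.filter (fun c => !c.contains x)) := by
  induction P with
  | nil => cases hb
  | cons c rest ih =>
    have hnd' := hnd
    rw [List.flatten_cons, List.nodup_append] at hnd'
    obtain ⟨_, hrest, hdisj⟩ := hnd'
    by_cases hxc : x ∈ c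
    · have hbc : b = c := blocks_eq_of_mem hnd hb List.mem_cons_self hx hxc
      have hfc : (c :: rest).filter (fun c' => !c'.contains x) = rest := by
        rw [List.filter_cons]
        have h0 : (!c.contains x) = false := by simp [hxc]
        rw [h0]
        simp only [Bool.false_eq_true, if_false]
        refine List.filter_eq_self.mpr ?_
        intro a ha
        have hxa : x ∉ a := fun hxa => (hdisj x hxc x (List.mem_flatten.mpr ⟨a, ha, hxa⟩)) rfl
        simp [hxa]
      rw [hfc, hbc]
    · have hbr : b ∈ rest := by
        rcases List.mem_cons.mp hb with rfl | h
        · exact absurd hx hxc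
        · exact h
      have hperm := ih hrest hbr
      have hfc : (c :: rest).filter (fun c' => !c'.contains x) =
          c :: rest.filter (fun c' => !c'.contains x) := by
        rw [List.filter_cons]
        have : (!c.contains x) = true := by simp [hxc]
        rw [this]
        simp
      rw [hfc]
      exact (hperm.cons c).trans (List.Perm.swap b c _)

theorem InvD_of_equiv {d : PySem.Dict Int (Option Int)} {Q Q' : List (List Int)}
    (h : InvD d Q) (hmem : ∀ z, z ∈ Q'.flatten ↔ z ∈ Q.flatten) (hnd : Q'.flatten.Nodup)
    (hblk : ∀ b' ∈ Q', ∃ b ∈ Q, ∀ z, z ∈ b' ↔ z ∈ b) : InvD d Q' := by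
  obtain ⟨hk, hiso, _, hch⟩ := h
  refine ⟨hk, fun x => (hiso x).trans (hmem x).symm, hnd, ?_⟩
  intro b' hb'
  obtain ⟨b, hb, hiff⟩ := hblk b' hb'
  obtain ⟨r, hr, hchains⟩ := hch b hb
  exact ⟨r, (hiff r).mpr hr, fun x hx => hchains x ((hiff x).mp hx)⟩

theorem union_spec_same {d : PySem.Dict Int (Option Int)} {num : Int} {P : List (List Int)}
    {b : List Int} {x y : Int} (h : InvD d P) (hb : b ∈ P) (hx : x ∈ b) (hy : y ∈ b) :
    InvD (ufUnion (d, num) x y).1 P ∧ (ufUnion (d, num) x y).2 = num ∧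
    (∀ z, ((ufUnion (d, num) x y).1.get? z).isSome = (d.get? z).isSome) := by
  obtain ⟨hk, hiso, hfnd, hch⟩ := h
  obtain ⟨r, hrb, hchains⟩ := hch b hb
  obtain ⟨lx, hlx, hlxnd⟩ := hchains x hx
  obtain ⟨f1, k1, iso1, pres1⟩ := find_spec hk hlx hlxnd
  obtain ⟨ly, hly, hlynd⟩ := hchains y hy
  obtain ⟨ly1, hly1, hly1nd⟩ := pres1 y ly r hly hlynd
  obtain ⟨f2, k2, iso2, pres2⟩ := find_spec k1 hly1 hly1nd
  have hcomp : ufUnion (d, num) x y = ((ufFind (ufFind d x).2 y).2, num) := by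
    simp [ufUnion, f1, f2]
  rw [hcomp]
  have hisoz : ∀ z, (((ufFind (ufFind d x).2 y).2).get? z).isSome = (d.get? z).isSome :=
    fun z => (iso2 z).trans (iso1 z)
  refine ⟨⟨k2, fun z => by rw [hisoz z]; exact hiso z, hfnd, ?_⟩, rfl, hisoz⟩
  intro b' hb'
  obtain ⟨r', hr'b, hchains'⟩ := hch b' hb'
  refine ⟨r', hr'b, fun w hw => ?_⟩
  obtain ⟨lw, hlw, hlwnd⟩ := hchains' w hw
  obtain ⟨lw1, hlw1, hlw1nd⟩ := pres1 w lw r' hlw hlwnd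
  exact pres2 w lw1 r' hlw1 hlw1nd

theorem extract2_perm {P : List (List Int)} (hnd : P.flatten.Nodup) {bx by_ : List Int}
    {x y : Int} (hbx : bx ∈ P) (hx : x ∈ bx) (hby : by_ ∈ P) (hy : y ∈ by_) (hne : bx ≠ by_) :
    P.Perm (bx :: by_ :: P.filter (fun c => !(c.contains x || c.contains y))) := by
  have h1 : P.Perm (bx :: P.filter (fun c => !c.contains x)) := extract_perm hnd hbx hx
  have hnd1 : (P.filter (fun c => !c.contains x)).flatten.Nodup := by
    have hperm := List.Perm.flatten h1
    have := (hperm.nodup_iff).mp hnd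
    rw [List.flatten_cons, List.nodup_append] at this
    exact this.2.1
  have hxby : x ∉ by_ := fun hxb => hne (blocks_eq_of_mem hnd hbx hby hx hxb)
  have hby1 : by_ ∈ P.filter (fun c => !c.contains x) :=
    List.mem_filter.mpr ⟨hby, by simp [hxby]⟩
  have h2 := extract_perm hnd1 hby1 hy
  have hPP : (P.filter (fun c => !c.contains x)).filter (fun c => !c.contains y) =
      P.filter (fun c => !(c.contains x || c.contains y)) := by
    rw [List.filter_filter]
    apply List.filter_congr
    intro c _
    cases c.contains x <;> cases c.contains y <;> rfl
  rw [hPP] at h2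
  exact h1.trans (h2.cons bx)

theorem union_spec_diff {d : PySem.Dict Int (Option Int)} {num : Int} {P : List (List Int)}
    {bx by_ : List Int} {x y : Int} (h : InvD d P) (hbx : bx ∈ P) (hx : x ∈ bx)
    (hby : by_ ∈ P) (hy : y ∈ by_) (hne : bx ≠ by_) :
    InvD (ufUnion (d, num) x y).1
      ((P.filter (fun c => !(c.contains x || c.contains y))) ++ [bx ++ by_]) ∧
    (ufUnion (d, num) x y).2 = num - 1 ∧
    (∀ z, ((ufUnion (d, num) x y).1.get? z).isSome = (d.get? z).isSome) := by
  obtain ⟨hk, hiso, hfnd, hch⟩ := h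
  obtain ⟨rx, hrxb, hchx⟩ := hch bx hbx
  obtain ⟨ry, hryb, hchy⟩ := hch by_ hby
  obtain ⟨lx, hlx, hlxnd⟩ := hchx x hx
  obtain ⟨f1, k1, iso1, pres1⟩ := find_spec hk hlx hlxnd
  obtain ⟨ly, hly, hlynd⟩ := hchy y hy
  obtain ⟨ly1, hly1, hly1nd⟩ := pres1 y ly ry hly hlynd
  obtain ⟨f2, k2, iso2, pres2⟩ := find_spec k1 hly1 hly1nd
  have hrxy : rx ≠ ry := fun he => hne (blocks_eq_of_mem hfnd hbx hby (he ▸ hrxb) hryb)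
  set d2 := (ufFind (ufFind d x).2 y).2 with hd2
  have pres12 : ∀ z l' r', UFChain d z l' r' → l'.Nodup →
      ∃ l'', UFChain d2 z l'' r' ∧ l''.Nodup := by
    intro z l' r' hl' hnd'
    obtain ⟨l1, h1, n1⟩ := pres1 z l' r' hl' hnd'
    exact pres2 z l1 r' h1 n1
  have hiso12 : ∀ z, (d2.get? z).isSome = (d.get? z).isSome := fun z => (iso2 z).trans (iso1 z)
  -- rx and ry are roots in d2
  have hrx2ex : ∃ l'', UFChain d2 rx l'' rx ∧ l''.Nodup := by
    obtain ⟨lrx, hlrx, hlrxnd⟩ := hchx rx hrxb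
    exact pres12 rx lrx rx hlrx hlrxnd
  obtain ⟨lrx2, hlrx2, -⟩ := hrx2ex
  have hrx2 : d2.get? rx = some none := chain_root hlrx2
  have hry2ex : ∃ l'', UFChain d2 ry l'' ry ∧ l''.Nodup := by
    obtain ⟨lry, hlry, hlrynd⟩ := hchy ry hryb
    exact pres12 ry lry ry hlry hlrynd
  obtain ⟨lry2, hlry2, -⟩ := hry2ex
  have hry2 : d2.get? ry = some none := chain_root hlry2
  have hcomp : ufUnion (d, num) x y = (d2.insert rx (some ry), num - 1) := by
    simp [ufUnion, f1, f2, hrxy, hd2]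
  rw [hcomp]
  set d' := d2.insert rx (some ry) with hd'
  -- chains in d2 never pass through rx unless they end there
  have havoid : ∀ {z l' r'}, UFChain d2 z l' r' → ∀ w ∈ l', w ≠ rx := by
    intro z l' r' hc w hw he
    obtain ⟨p, hp⟩ := chain_nodes_some hc w hw
    rw [he, hrx2] at hp
    cases hp
  have hperm2 : P.Perm (bx :: by_ :: P.filter (fun c => !(c.contains x || c.contains y))) :=
    extract2_perm hfnd hbx hx hby hy hne
  set F := P.filter (fun c => !(c.contains x || c.contains y)) with hF
  have hflatshape : (F ++ [bx ++ by_]).flatten = F.flatten ++ (bx ++ by_) := by simp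
  have hflatperm : (F ++ [bx ++ by_]).flatten.Perm P.flatten := by
    rw [hflatshape]
    refine (List.perm_append_comm).trans ?_
    have := (List.Perm.flatten hperm2).symm
    simpa using this
  have hiso' : ∀ z, (d'.get? z).isSome = (d.get? z).isSome := by
    intro z
    by_cases hz : z = rx
    · have hsome : (d.get? rx).isSome := (hiso rx).mpr (List.mem_flatten.mpr ⟨bx, hbx, hrxb⟩)
      rw [hz, hd', PySem.Dict.get?_insert_self]
      simp [hsome]
    · rw [hd', PySem.Dict.get?_insert_of_ne _ _ hz]
      exact hiso12 z
  refine ⟨⟨PySem.Dict.nodup_keys_insert _ _ _ k2,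
    fun z => by rw [hiso' z]; exact (hiso z).trans (List.Perm.mem_iff hflatperm).symm,
    hflatperm.nodup_iff.mpr hfnd, ?_⟩, rfl, hiso'⟩
  intro b' hb'
  rcases List.mem_append.mp hb' with hbF | hbm
  · -- untouched block
    have hbP : b' ∈ P := (List.mem_filter.mp hbF).1
    have hpredb : (!(b'.contains x || b'.contains y)) = true := (List.mem_filter.mp hbF).2
    have hxnb : x ∉ b' := by
      intro hm
      simp [hm] at hpredb
    have hynb : y ∉ b' := by
      intro hm
      simp [hm] at hpredb
    obtain ⟨r', hr'b, hchains'⟩ := hch b' hbP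
    have hr'rx : r' ≠ rx := by
      intro he
      exact hxnb (blocks_eq_of_mem hfnd hbx hbP hrxb (he ▸ hr'b) ▸ hx)
    refine ⟨r', hr'b, fun w hw => ?_⟩
    obtain ⟨lw, hlw, hlwnd⟩ := hchains' w hw
    obtain ⟨lw2, hlw2, hlw2nd⟩ := pres12 w lw r' hlw hlwnd
    exact ⟨lw2, chain_insert_of_ne hlw2 (havoid hlw2) hr'rx, hlw2nd⟩
  · -- merged block
    have hbm' : b' = bx ++ by_ := by simpa using hbm
    subst hbm'
    have hryrx : ry ≠ rx := Ne.symm hrxy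
    refine ⟨ry, List.mem_append.mpr (Or.inr hryb), fun w hw => ?_⟩
    rcases List.mem_append.mp hw with hwx | hwy
    · obtain ⟨lw, hlw, hlwnd⟩ := hchx w hwx
      obtain ⟨lw2, hlw2, hlw2nd⟩ := pres12 w lw rx hlw hlwnd
      refine ⟨lw2 ++ [rx], chain_extend hlw2 hry2 hryrx, ?_⟩
      rw [List.nodup_append]
      refine ⟨hlw2nd, List.nodup_singleton _, ?_⟩
      intro a ha b hb
      have := havoid hlw2 a ha
      simp only [List.mem_singleton] at hb
      rw [hb]
      exact this
    · obtain ⟨lw, hlw, hlwnd⟩ := hchy w hwy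
      obtain ⟨lw2, hlw2, hlw2nd⟩ := pres12 w lw ry hlw hlwnd
      exact ⟨lw2, chain_insert_of_ne hlw2 (havoid hlw2) hryrx, hlw2nd⟩

def nsUpto (isC : List (List Int)) (i j : Nat) : List Int :=
  ((List.range j).filter
      (fun j' => PySem.List.pyGetD (PySem.List.pyGetD isC (i : Int) []) ((j' : Nat) : Int) 0 ≠ 0)).map
    (fun j' => ((j' : Nat) : Int))

def stepUpto (isC : List (List Int)) (P : List (List Int)) (i j : Nat) : List (List Int) :=
  P.filter (fun c => !altTouches (nsUpto isC i j) c) ++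
    [(i : Int) :: (P.filter (fun c => altTouches (nsUpto isC i j) c)).flatten]

theorem altStep_eq (isC : List (List Int)) (P : List (List Int)) (i : Nat) :
    altStep isC P i = stepUpto isC P i i := by
  simp only [altStep, stepUpto, nsUpto]
  rw [PySem.List.foldl_append_eq_flatten, List.singleton_append]

theorem stepUpto_flatten_perm (isC : List (List Int)) (P : List (List Int)) (i j : Nat) :
    (stepUpto isC P i j).flatten.Perm ((i : Int) :: P.flatten) := by
  have h1 : (P.filter (fun c => altTouches (nsUpto isC i j) c) ++
      P.filter (fun c => !altTouches (nsUpto isC i j) c)).Perm P :=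
    List.filter_append_perm _ P
  have hshape : (stepUpto isC P i j).flatten =
      (P.filter (fun c => !altTouches (nsUpto isC i j) c)).flatten ++
        ((i : Int) :: (P.filter (fun c => altTouches (nsUpto isC i j) c)).flatten) := by
    simp [stepUpto]
  rw [hshape]
  refine List.perm_middle.trans (List.Perm.cons _ ?_)
  refine (List.perm_append_comm).trans ?_
  rw [← List.flatten_append]
  exact List.Perm.flatten h1

theorem add_spec {d : PySem.Dict Int (Option Int)} {num : Int} {P : List (List Int)}
    (hInv : InvD d P) {i0 : Int} (hfresh : i0 ∉ P.flatten) :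
    InvD (ufAdd (d, num) i0).1 (P ++ [[i0]]) ∧ (ufAdd (d, num) i0).2 = num + 1 := by
  obtain ⟨hk, hiso, hfnd, hch⟩ := hInv
  have hnone : (d.get? i0).isSome = false := by
    have hn : ¬ (d.get? i0).isSome := fun hs => hfresh ((hiso i0).mp hs)
    exact Bool.eq_false_iff.mpr hn
  have hcomp : ufAdd (d, num) i0 = (d.insert i0 none, num + 1) := by simp [ufAdd, hnone]
  rw [hcomp]
  refine ⟨⟨PySem.Dict.nodup_keys_insert _ _ _ hk, ?_, ?_, ?_⟩, rfl⟩
  · intro z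
    by_cases hz : z = i0
    · rw [hz, PySem.Dict.get?_insert_self]
      simp
    · rw [PySem.Dict.get?_insert_of_ne _ _ hz, hiso z]
      simp [hz]
  · simp only [List.flatten_append, List.flatten_cons, List.flatten_nil, List.append_nil]
    rw [List.nodup_append]
    exact ⟨hfnd, List.nodup_singleton _,
      fun a ha b hb => by simp only [List.mem_singleton] at hb; exact fun he => hfresh ((hb ▸ he) ▸ ha)⟩
  · intro b hb
    rcases List.mem_append.mp hb with hbP | hbi
    · obtain ⟨r, hrb, hchains⟩ := hch b hbP
      have hrne : r ≠ i0 := fun he => hfresh (he ▸ List.mem_flatten.mpr ⟨b, hbP, hrb⟩)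
      refine ⟨r, hrb, fun w hw => ?_⟩
      obtain ⟨lw, hlw, hlwnd⟩ := hchains w hw
      refine ⟨lw, chain_insert_of_ne hlw (fun u hu he => ?_) hrne, hlwnd⟩
      obtain ⟨p, hp⟩ := chain_nodes_some hlw u hu
      rw [← he, hp] at hnone
      simp at hnone
    · have hbeq : b = [i0] := by simpa using hbi
      subst hbeq
      exact ⟨i0, List.mem_singleton.mpr rfl, fun w hw => by
        rw [List.mem_singleton.mp hw]
        exact ⟨[], UFChain.nil _ _ (PySem.Dict.get?_insert_self _ _ _), List.nodup_nil⟩⟩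

theorem inner_sim (isC : List (List Int)) (i : Nat) (d : PySem.Dict Int (Option Int))
    (num : Int) (P : List (List Int)) (hInv : InvD d P) (hnum : num = (P.length : Int))
    (hmem : ∀ x : Int, x ∈ P.flatten ↔ 0 ≤ x ∧ x < (i : Int)) :
    ∀ j, j ≤ i →
      InvD ((List.range j).foldl (fun st2 j' =>
          if PySem.List.pyGetD (PySem.List.pyGetD isC (i : Int) []) ((j' : Nat) : Int) 0 ≠ 0 then
            ufUnion st2 (i : Int) ((j' : Nat) : Int)
          else st2) (ufAdd (d, num) (i : Int))).1 (stepUpto isC P i j) ∧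
      ((List.range j).foldl (fun st2 j' =>
          if PySem.List.pyGetD (PySem.List.pyGetD isC (i : Int) []) ((j' : Nat) : Int) 0 ≠ 0 then
            ufUnion st2 (i : Int) ((j' : Nat) : Int)
          else st2) (ufAdd (d, num) (i : Int))).2 = ((stepUpto isC P i j).length : Int) := by
  intro j
  induction j with
  | zero =>
    intro _
    have hfresh : ((i : Int)) ∉ P.flatten := by
      intro hmemi
      have := (hmem _).mp hmemi
      omega
    have h0 : stepUpto isC P i 0 = P ++ [[(i : Int)]] := by
      simp [stepUpto, nsUpto, altTouches]
    obtain ⟨hI, hN⟩ := add_spec ⟨hInv.1, hInv.2.1, hInv.2.2.1, hInv.2.2.2⟩ hfresh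
    simp only [List.range_zero, List.foldl_nil]
    rw [h0]
    refine ⟨hI, ?_⟩
    rw [hN, hnum]
    simp only [List.length_append, List.length_cons, List.length_nil]
    push_cast
    ring
  | succ j ih =>
    intro hj
    have hji : j ≤ i := Nat.le_of_succ_le hj
    obtain ⟨ihI, ihN⟩ := ih hji
    rw [List.range_succ, List.foldl_append, List.foldl_cons, List.foldl_nil]
    by_cases hedge :
        PySem.List.pyGetD (PySem.List.pyGetD isC (i : Int) []) ((j : Nat) : Int) 0 ≠ 0
    · rw [if_pos hedge]
      have hns : nsUpto isC i (j + 1) = nsUpto isC i j ++ [((j : Nat) : Int)] := by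
        rw [nsUpto, nsUpto, List.range_succ, List.filter_append, List.map_append]
        simp only [List.filter_cons, List.filter_nil]
        rw [if_pos (decide_eq_true hedge)]
        simp only [List.map_cons, List.map_nil]
      have hjm : (((j : Nat) : Int)) ∈ P.flatten :=
        (hmem _).mpr ⟨Int.natCast_nonneg j, by exact_mod_cast (Nat.lt_of_succ_le hj)⟩
      obtain ⟨bj, hbjP, hjbj⟩ := List.mem_flatten.mp hjm
      have hfnd : P.flatten.Nodup := hInv.2.2.1
      have htouch : ∀ c ∈ P, altTouches (nsUpto isC i (j + 1)) c =
          (altTouches (nsUpto isC i j) c || c.contains ((j : Nat) : Int)) := by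
        intro c _
        rw [hns]
        simp [altTouches, List.any_append]
      have hcj : ∀ c ∈ P, c.contains ((j : Nat) : Int) = true → c = bj := by
        intro c hc hcont
        exact blocks_eq_of_mem hfnd hc hbjP (List.contains_iff_mem.mp hcont) hjbj
      have hifresh : ((i : Int)) ∉ P.flatten := by
        intro hmm
        have := (hmem _).mp hmm
        omega
      have hBiQ : ((i : Int) :: (P.filter (fun c => altTouches (nsUpto isC i j) c)).flatten) ∈
          stepUpto isC P i j := by
        simp [stepUpto]
      have hiBi : ((i : Int)) ∈
          ((i : Int) :: (P.filter (fun c => altTouches (nsUpto isC i j) c)).flatten) :=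
        List.mem_cons_self
      by_cases htj : altTouches (nsUpto isC i j) bj = true
      · -- the edge joins two already-joined blocks: union is a no-op
        have hjBi : (((j : Nat) : Int)) ∈
            ((i : Int) :: (P.filter (fun c => altTouches (nsUpto isC i j) c)).flatten) :=
          List.mem_cons_of_mem _
            (List.mem_flatten.mpr ⟨bj, List.mem_filter.mpr ⟨hbjP, htj⟩, hjbj⟩)
        obtain ⟨uI, uN, -⟩ := union_spec_same ihI hBiQ hiBi hjBi
        have hfe : ∀ c ∈ P,
            altTouches (nsUpto isC i (j + 1)) c = altTouches (nsUpto isC i j) c := by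
          intro c hc
          rw [htouch c hc]
          by_cases hcc : c.contains ((j : Nat) : Int) = true
          · have hceq := hcj c hc hcc
            rw [hceq, htj]
            rfl
          · have hcf : c.contains ((j : Nat) : Int) = false := by
              simpa using hcc
            rw [hcf, Bool.or_false]
        have hQeq : stepUpto isC P i (j + 1) = stepUpto isC P i j := by
          simp only [stepUpto]
          rw [List.filter_congr (fun c hc => by rw [hfe c hc] :
                ∀ c ∈ P, (!altTouches (nsUpto isC i (j+1)) c) = (!altTouches (nsUpto isC i j) c)),
              List.filter_congr hfe]
        rw [hQeq]
        exact ⟨uI, uN.trans ihN⟩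
      · -- the edge merges block bj into i's block
        have htjf : altTouches (nsUpto isC i j) bj = false := Bool.eq_false_iff.mpr htj
        have hbjQ : bj ∈ stepUpto isC P i j :=
          List.mem_append_left _ (List.mem_filter.mpr ⟨hbjP, by rw [htjf]; rfl⟩)
        have hne : ((i : Int) :: (P.filter (fun c => altTouches (nsUpto isC i j) c)).flatten) ≠ bj := by
          intro he
          exact hifresh (List.mem_flatten.mpr ⟨bj, hbjP, he ▸ hiBi⟩)
        obtain ⟨uI, uN, uIso⟩ := union_spec_diff ihI hBiQ hiBi hbjQ hjbj hne
        have hcontbj : bj.contains ((j : Nat) : Int) = true := List.contains_iff_mem.mpr hjbj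
        -- block matching between the merged partition and stepUpto (j+1)
        have hblk : ∀ b' ∈ stepUpto isC P i (j + 1),
            ∃ b ∈ (stepUpto isC P i j).filter
                  (fun c => !(c.contains ((i : Int)) || c.contains ((j : Nat) : Int))) ++
                [((i : Int) :: (P.filter (fun c => altTouches (nsUpto isC i j) c)).flatten) ++ bj],
              ∀ z, z ∈ b' ↔ z ∈ b := by
          intro b' hb'
          rcases List.mem_append.mp hb' with hbF | hbm
          · have hbP' : b' ∈ P := (List.mem_filter.mp hbF).1
            have ht'b : altTouches (nsUpto isC i (j + 1)) b' = false := by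
              have := (List.mem_filter.mp hbF).2
              simpa using this
            have htb2 : (altTouches (nsUpto isC i j) b' || b'.contains ((j : Nat) : Int)) = false := by
              rw [← htouch b' hbP']
              exact ht'b
            have htb : altTouches (nsUpto isC i j) b' = false ∧
                b'.contains ((j : Nat) : Int) = false := Bool.or_eq_false_iff.mp htb2
            have hib' : b'.contains ((i : Int)) = false := by
              refine Bool.eq_false_iff.mpr ?_
              intro hc
              exact hifresh (List.mem_flatten.mpr ⟨b', hbP', List.contains_iff_mem.mp hc⟩)
            refine ⟨b', ?_, fun z => Iff.rfl⟩
            refine List.mem_append_left _ (List.mem_filter.mpr ⟨?_, ?_⟩)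
            · exact List.mem_append_left _ (List.mem_filter.mpr ⟨hbP', by rw [htb.1]; rfl⟩)
            · rw [hib', htb.2]
              rfl
          · have hbeq : b' =
                (i : Int) :: (P.filter (fun c => altTouches (nsUpto isC i (j + 1)) c)).flatten := by
              simpa using hbm
            refine ⟨_, List.mem_append_right _ (List.mem_singleton.mpr rfl), ?_⟩
            intro z
            rw [hbeq]
            constructor
            · intro hz
              rcases List.mem_cons.mp hz with rfl | hz
              · exact List.mem_append_left _ List.mem_cons_self
              · obtain ⟨c, hcm, hzc⟩ := List.mem_flatten.mp hz
                obtain ⟨hcP, hct'⟩ := List.mem_filter.mp hcm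
                have hor : (altTouches (nsUpto isC i j) c || c.contains ((j : Nat) : Int)) = true := by
                  rw [← htouch c hcP]
                  exact hct'
                rcases Bool.or_eq_true_iff.mp hor with hcase | hcase
                · exact List.mem_append_left _ (List.mem_cons_of_mem _
                    (List.mem_flatten.mpr ⟨c, List.mem_filter.mpr ⟨hcP, hcase⟩, hzc⟩))
                · exact List.mem_append_right _ ((hcj c hcP hcase) ▸ hzc)
            · intro hz
              rcases List.mem_append.mp hz with hzL | hzR
              · rcases List.mem_cons.mp hzL with rfl | hz2
                · exact List.mem_cons_self
                · obtain ⟨c, hcm, hzc⟩ := List.mem_flatten.mp hz2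
                  obtain ⟨hcP, hct⟩ := List.mem_filter.mp hcm
                  refine List.mem_cons_of_mem _ (List.mem_flatten.mpr
                    ⟨c, List.mem_filter.mpr ⟨hcP, ?_⟩, hzc⟩)
                  rw [htouch c hcP, hct]
                  rfl
              · refine List.mem_cons_of_mem _ (List.mem_flatten.mpr
                  ⟨bj, List.mem_filter.mpr ⟨hbjP, ?_⟩, hzR⟩)
                rw [htouch bj hbjP, hcontbj]
                simp
        constructor
        · refine InvD_of_equiv uI ?_ ?_ hblk
          · intro z
            have hmQ' := (stepUpto_flatten_perm isC P i (j + 1)).mem_iff (a := z)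
            have hmQj := (stepUpto_flatten_perm isC P i j).mem_iff (a := z)
            have hQm : z ∈ ((stepUpto isC P i j).filter
                  (fun c => !(c.contains ((i : Int)) || c.contains ((j : Nat) : Int))) ++
                [((i : Int) :: (P.filter (fun c => altTouches (nsUpto isC i j) c)).flatten) ++
                  bj]).flatten ↔ z ∈ (stepUpto isC P i j).flatten := by
              rw [← uI.2.1 z]
              have h2 := uIso z
              have h3 := ihI.2.1 z
              constructor
              · intro hs
                rw [h2] at hs
                exact h3.mp hs
              · intro hs
                rw [h2]
                exact h3.mpr hs
            exact (hmQ'.trans hmQj.symm).trans hQm.symm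
          · exact (stepUpto_flatten_perm isC P i (j + 1)).nodup_iff.mpr
              (List.nodup_cons.mpr ⟨hifresh, hfnd⟩)
        · have hft' : P.filter (fun c => !altTouches (nsUpto isC i (j + 1)) c) =
              (P.filter (fun c => !altTouches (nsUpto isC i j) c)).filter
                (fun c => !c.contains ((j : Nat) : Int)) := by
            rw [List.filter_filter]
            refine List.filter_congr ?_
            intro c hc
            rw [htouch c hc]
            cases altTouches (nsUpto isC i j) c <;> cases c.contains ((j : Nat) : Int) <;> rfl
          have hsubnd : (P.filter (fun c => !altTouches (nsUpto isC i j) c)).flatten.Nodup :=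
            ((List.filter_sublist).flatten).nodup hfnd
          have hbjf : bj ∈ P.filter (fun c => !altTouches (nsUpto isC i j) c) :=
            List.mem_filter.mpr ⟨hbjP, by rw [htjf]; rfl⟩
          have hext := (extract_perm hsubnd hbjf hjbj).length_eq
          have hlen : (stepUpto isC P i j).length = (stepUpto isC P i (j + 1)).length + 1 := by
            simp only [stepUpto, List.length_append, List.length_cons, List.length_nil]
            rw [hft']
            simp only [List.length_cons] at hext
            omega
          rw [uN, ihN, hlen]
          push_cast
          ring
    · rw [if_neg hedge]
      have hns : nsUpto isC i (j + 1) = nsUpto isC i j := by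
        rw [nsUpto, nsUpto, List.range_succ, List.filter_append, List.map_append]
        simp only [List.filter_cons, List.filter_nil]
        rw [if_neg (fun h => Bool.false_ne_true ((decide_eq_false hedge) ▸ h))]
        simp only [List.map_nil, List.append_nil]
      have hQ : stepUpto isC P i (j + 1) = stepUpto isC P i j := by
        simp only [stepUpto, hns]
      rw [hQ]
      exact ⟨ihI, ihN⟩

theorem main_sim (isC : List (List Int)) (k : Nat) :
    InvD ((List.range k).foldl (fun st (i : Nat) =>
        (List.range i).foldl (fun st2 (j : Nat) =>
            if PySem.List.pyGetD (PySem.List.pyGetD isC (i : Int) []) ((j : Nat) : Int) 0 ≠ 0 then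
              ufUnion st2 (i : Int) ((j : Nat) : Int)
            else st2)
          (ufAdd st (i : Int)))
      (PySem.Dict.empty, 0)).1 ((List.range k).foldl (altStep isC) []) ∧
    ((List.range k).foldl (fun st (i : Nat) =>
        (List.range i).foldl (fun st2 (j : Nat) =>
            if PySem.List.pyGetD (PySem.List.pyGetD isC (i : Int) []) ((j : Nat) : Int) 0 ≠ 0 then
              ufUnion st2 (i : Int) ((j : Nat) : Int)
            else st2)
          (ufAdd st (i : Int)))
      (PySem.Dict.empty, 0)).2 = (((List.range k).foldl (altStep isC) []).length : Int) ∧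
    (∀ x : Int, x ∈ ((List.range k).foldl (altStep isC) []).flatten ↔ 0 ≤ x ∧ x < (k : Int)) := by
  induction k with
  | zero =>
    simp only [List.range_zero, List.foldl_nil]
    refine ⟨⟨?_, ?_, ?_, ?_⟩, by norm_num, ?_⟩
    · simp [PySem.Dict.keys_empty]
    · intro x
      simp [PySem.Dict.get?_empty]
    · simp
    · intro b hb
      simp at hb
    · intro x
      simp
  | succ k ih =>
    obtain ⟨ihI, ihN, ihM⟩ := ih
    simp only [List.range_succ, List.foldl_append, List.foldl_cons, List.foldl_nil]
    have h := inner_sim isC k _ _ _ ihI ihN ihM k (le_refl k)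
    rw [altStep_eq]
    refine ⟨h.1, h.2, ?_⟩
    intro x
    have hp := (stepUpto_flatten_perm isC ((List.range k).foldl (altStep isC) []) k k).mem_iff
      (a := x)
    constructor
    · intro hx
      rcases List.mem_cons.mp (hp.mp hx) with rfl | hx2
      · constructor
        · exact Int.natCast_nonneg k
        · push_cast
          omega
      · have := (ihM x).mp hx2
        push_cast
        omega
    · rintro ⟨h0, hlt⟩
      by_cases hxk : x = (k : Int)
      · exact hp.mpr (hxk ▸ List.mem_cons_self)
      · refine hp.mpr (List.mem_cons_of_mem _ ((ihM x).mpr ⟨h0, ?_⟩))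
        push_cast at hlt
        omega

-- ===== VERDICT (by name: the statement is the Claim_ definition above) =====
theorem findCircleNum4_spec : Claim_equal_findCircleNum4 := by
  intro isC _ _
  unfold Spec_findCircleNum4 findCircleNum4 findCircleNum4_alt
  exact (main_sim isC isC.length).2.1
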